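-- pv_equiv track=rewrite | github.com/StoianBodurov/SoftUni | Python/Advanced/00-Exams/27_june_2020/2_snake.py | find_snake_coordinates
-- ===== SOURCE A (Python) =====
-- def find_snake_coordinates(matrix):
--     row_index = 0
--     col_index = 0
--     for r in range(len(matrix)):
--         for c in range(len(matrix)):
--             if matrix[r][c] == 'S':
--                 row_index = r
--                 col_index = c
--
--     return row_index, col_index
-- ===== SOURCE B (Python) =====
-- def find_snake_coordinates(matrix):
--     n = len(matrix)
--     for r in reversed(range(n)):
--         for c in reversed(range(n)):
--             if matrix[r][c] == 'S':
--                 return r, c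
--     return 0, 0
-- ===== Notes on version B (the rewrite author's own statement) =====
-- stated objective: alternative
-- what changed: B scans the grid in reverse order and returns immediately at the first 'S' found (the last in A's forward order), instead of A's full forward scan that keeps overwriting the last-seen position.
import Mathlib
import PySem

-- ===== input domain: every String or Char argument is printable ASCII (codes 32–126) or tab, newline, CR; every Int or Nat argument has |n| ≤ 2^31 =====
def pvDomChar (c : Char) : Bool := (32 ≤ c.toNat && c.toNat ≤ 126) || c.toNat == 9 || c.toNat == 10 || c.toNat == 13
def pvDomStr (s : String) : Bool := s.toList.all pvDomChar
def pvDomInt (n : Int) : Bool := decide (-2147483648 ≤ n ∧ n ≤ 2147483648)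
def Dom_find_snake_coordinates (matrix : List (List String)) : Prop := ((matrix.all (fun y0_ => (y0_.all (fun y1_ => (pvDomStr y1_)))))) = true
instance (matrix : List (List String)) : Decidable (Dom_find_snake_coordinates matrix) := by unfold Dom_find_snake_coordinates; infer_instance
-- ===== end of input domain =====

-- B: reverse scan with early return at the first 'S' seen (A's last), instead of A's full forward scan keeping the last match; same worst-case cost.

-- ===== PORT A =====
-- forward double loop over range(len(matrix)), overwriting (row_index, col_index) at every 'S'
def find_snake_coordinates (matrix : List (List String)) : Int × Int :=
  let n := matrix.length
  (List.range n).foldl (fun st r =>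
    (List.range n).foldl (fun st c =>
      if (matrix.getD r []).getD c "" == "S" then ((r : Int), (c : Int)) else st) st)
    (0, 0)

-- ===== PORT B =====
-- scan row r's columns n-1 … 0, first 'S' found
def pvColScan (row : List String) : Nat → Option Nat
  | 0 => none
  | c + 1 => if row.getD c "" == "S" then some c else pvColScan row c

-- scan rows r-1 … 0, returning at the first row whose reverse column scan finds 'S'
def pvRowScan (matrix : List (List String)) (n : Nat) : Nat → Int × Int
  | 0 => (0, 0)
  | r + 1 =>
    match pvColScan (matrix.getD r []) n with
    | some c => ((r : Int), (c : Int))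
    | none => pvRowScan matrix n r

def find_snake_coordinates_alt (matrix : List (List String)) : Int × Int :=
  let n := matrix.length
  pvRowScan matrix n n

-- ===== PRECONDITION & SPEC =====
-- Pre_ excludes matrices having a row shorter than len(matrix): Python A raises IndexError there (out-of-range matrix[r][c]).
def Pre_find_snake_coordinates (matrix : List (List String)) : Prop :=
  ∀ row ∈ matrix, matrix.length ≤ row.length
instance (matrix : List (List String)) : Decidable (Pre_find_snake_coordinates matrix) := by unfold Pre_find_snake_coordinates; infer_instance

def pvWitness_find_snake_coordinates : List (List String) := [["x", "S"], ["S", "y"]]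

def Spec_find_snake_coordinates (matrix : List (List String)) (out : Int × Int) : Prop := out = find_snake_coordinates_alt matrix
instance (matrix : List (List String)) (out : Int × Int) : Decidable (Spec_find_snake_coordinates matrix out) := by unfold Spec_find_snake_coordinates; infer_instance

-- ===== CLAIM (what is proved, stated in full; the proofs are below) =====
def Claim_equal_find_snake_coordinates : Prop := ∀ (matrix : List (List String)), Dom_find_snake_coordinates matrix → Pre_find_snake_coordinates matrix → Spec_find_snake_coordinates matrix (find_snake_coordinates matrix)

-- ===== LEMMAS AND PROOFS =====

-- A's inner loop over a row equals B's reverse column scan applied to the previous state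
theorem pv_inner (row : List String) (ri : Int) (n : Nat) (st : Int × Int) :
    (List.range n).foldl (fun st c => if row.getD c "" == "S" then (ri, (c : Int)) else st) st
      = match pvColScan row n with
        | some c => (ri, (c : Int))
        | none => st := by
  induction n with
  | zero => simp [pvColScan]
  | succ m ih =>
    rw [List.range_succ, List.foldl_append, ih]
    simp only [List.foldl, pvColScan]
    by_cases h : row[m]?.getD "" = "S" <;> simp [List.getD, h]

-- A's outer loop over the first r rows equals B's reverse row scan
theorem pv_outer (matrix : List (List String)) (n r : Nat) :
    (List.range r).foldl (fun st r' =>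
        (List.range n).foldl (fun st c =>
          if (matrix.getD r' []).getD c "" == "S" then ((r' : Int), (c : Int)) else st) st)
      (0, 0)
      = pvRowScan matrix n r := by
  induction r with
  | zero => simp [pvRowScan]
  | succ m ih =>
    rw [List.range_succ, List.foldl_append, ih]
    simp only [List.foldl]
    rw [pv_inner]
    rfl

-- ===== VERDICT (by name: the statement is the Claim_ definition above) =====
theorem find_snake_coordinates_spec : Claim_equal_find_snake_coordinates := by
  intro matrix _ _
  unfold Spec_find_snake_coordinates find_snake_coordinates find_snake_coordinates_alt
  exact pv_outer matrix matrix.length matrix.length
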